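-- pv_equiv track=rewrite | github.com/rajbhupendra588/ai-uml | backend/github_repo.py | _gather_file_tree_summary
-- ===== SOURCE A (Python) =====
-- def _gather_file_tree_summary(tree: list[dict], projects: list[str] | None = None) -> str:
--     """Build a structure summary: directories with file counts and key paths."""
--     dir_files: dict[str, list[str]] = {}
--     root_files: list[str] = []
--     for entry in tree:
--         path = (entry.get("path") or "").strip()
--         if not path or path.startswith("."):
--             continue
--         parts = path.split("/")
--         if len(parts) == 1:
--             root_files.append(path)
--         else:
--             top = parts[0]
--             if top not in dir_files:
--                 dir_files[top] = []
--             dir_files[top].append(path)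
--     lines = []
--     if projects:
--         lines.append("MONOREPO - Projects: " + ", ".join(projects))
--         lines.append("")
--     if root_files:
--         lines.append("Root files: " + ", ".join(sorted(root_files)[:40]))
--     for top in sorted(dir_files.keys())[:20]:
--         files = dir_files[top]
--         sample = sorted(files)[:15]
--         more = f" (+{len(files) - 15} more)" if len(files) > 15 else ""
--         lines.append(f"  {top}/: {', '.join(sample)}{more}")
--     return "\n".join(lines) if lines else ""
-- ===== SOURCE B (Python) =====
-- def _gather_file_tree_summary(tree: list[dict], projects: list[str] | None = None) -> str:
--     """Summary via sorted set of top dirs + per-directory filter scans (no dict grouping)."""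
--     stripped = [(entry.get("path") or "").strip() for entry in tree]
--     paths = [p for p in stripped if p and not p.startswith(".")]
--     roots = sorted(p for p in paths if "/" not in p)
--     tops = sorted({p.split("/")[0] for p in paths if "/" in p})
--     lines = []
--     if projects:
--         lines.append("MONOREPO - Projects: " + ", ".join(projects))
--         lines.append("")
--     if roots:
--         lines.append("Root files: " + ", ".join(roots[:40]))
--     for top in tops[:20]:
--         files = sorted(p for p in paths if "/" in p and p.split("/")[0] == top)
--         more = f" (+{len(files) - 15} more)" if len(files) > 15 else ""
--         lines.append(f"  {top}/: {', '.join(files[:15])}{more}")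
--     return "\n".join(lines)
-- ===== Notes on version B (the rewrite author's own statement) =====
-- stated objective: simpler
-- what changed: Replaces the one-pass dict-of-lists grouping with comprehensions: a sorted set of top-level directory names plus a per-directory filter scan over the path list, so no mutable dict is built at all.
import Mathlib
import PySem

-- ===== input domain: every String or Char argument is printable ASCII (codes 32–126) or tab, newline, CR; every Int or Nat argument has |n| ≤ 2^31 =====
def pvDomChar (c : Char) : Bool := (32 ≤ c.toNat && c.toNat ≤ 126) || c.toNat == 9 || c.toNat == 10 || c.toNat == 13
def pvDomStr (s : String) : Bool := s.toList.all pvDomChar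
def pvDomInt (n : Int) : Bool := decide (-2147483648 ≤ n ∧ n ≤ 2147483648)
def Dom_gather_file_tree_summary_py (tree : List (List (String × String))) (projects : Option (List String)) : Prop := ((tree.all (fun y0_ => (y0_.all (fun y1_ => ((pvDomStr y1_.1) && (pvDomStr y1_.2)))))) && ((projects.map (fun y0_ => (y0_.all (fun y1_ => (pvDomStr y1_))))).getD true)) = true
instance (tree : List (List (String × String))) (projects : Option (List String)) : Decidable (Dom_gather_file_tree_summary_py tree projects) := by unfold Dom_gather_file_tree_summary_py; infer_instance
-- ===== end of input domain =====

-- B replaces A's one-pass mutable dict-of-lists grouping by a sorted set of top-level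
-- directory names plus a per-directory filter scan (simpler, comprehension-style; not faster).

-- ===== PORT A =====
-- loop body of A's 'for entry in tree' (state = (dir_files, root_files))
def pvAStep (st : PySem.Dict String (List String) × List String) (entry : List (String × String)) : PySem.Dict String (List String) × List String :=
  let path := PySem.Str.strip (((PySem.Dict.ofList entry).get? "path").getD "")
  if path == "" || PySem.Str.startswith path "." then st
  else
    let parts := (PySem.Str.split? path "/").getD []
    if parts.length == 1 then (st.1, st.2 ++ [path])
    else
      let top := parts.headI
      let d := if st.1.contains top then st.1 else st.1.insert top ([] : List String)
      (d.modify top [] (fun l => l ++ [path]), st.2)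

def gather_file_tree_summary_py (tree : List (List (String × String))) (projects : Option (List String)) : String :=
  let st := tree.foldl pvAStep ((PySem.Dict.empty : PySem.Dict String (List String)), ([] : List String))
  let dir_files := st.1
  let root_files := st.2
  let lines : List String :=
    match projects with
    | some (p :: ps) => ["MONOREPO - Projects: " ++ PySem.Str.join ", " (p :: ps), ""]
    | _ => []
  let lines := if root_files ≠ [] then lines ++ ["Root files: " ++ PySem.Str.join ", " ((PySem.List.sorted root_files (fun x => x) false).take 40)] else lines
  let lines := ((PySem.List.sorted dir_files.keys (fun x => x) false).take 20).foldl (fun lines top =>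
      let files := dir_files.getD top []
      let sample := (PySem.List.sorted files (fun x => x) false).take 15
      let more := if files.length > 15 then " (+" ++ PySem.Int.toStr ((files.length : Int) - 15) ++ " more)" else ""
      lines ++ ["  " ++ top ++ "/: " ++ PySem.Str.join ", " sample ++ more]) lines
  if lines ≠ [] then PySem.Str.join "\n" lines else ""

-- ===== PORT B =====
def gather_file_tree_summary_py_alt (tree : List (List (String × String))) (projects : Option (List String)) : String :=
  let stripped := tree.map (fun entry => PySem.Str.strip (((PySem.Dict.ofList entry).get? "path").getD ""))
  let paths := stripped.filter (fun p => !(p == "" || PySem.Str.startswith p "."))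
  let roots := PySem.List.sorted (paths.filter (fun p => !PySem.Str.isIn "/" p)) (fun x => x) false
  let tops := PySem.List.sorted ((PySem.Set.ofList ((paths.filter (fun p => PySem.Str.isIn "/" p)).map (fun p => ((PySem.Str.split? p "/").getD []).headI)) : PySem.Set String) : List String) (fun x => x) false
  let lines : List String :=
    match projects with
    | none => []
    | some ps => if ps = [] then [] else ["MONOREPO - Projects: " ++ PySem.Str.join ", " ps, ""]
  let lines := if roots ≠ [] then lines ++ ["Root files: " ++ PySem.Str.join ", " (roots.take 40)] else lines
  let lines := lines ++ (tops.take 20).map (fun top =>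
      let files := PySem.List.sorted (paths.filter (fun p => PySem.Str.isIn "/" p && (((PySem.Str.split? p "/").getD []).headI == top))) (fun x => x) false
      let more := if files.length > 15 then " (+" ++ PySem.Int.toStr ((files.length : Int) - 15) ++ " more)" else ""
      "  " ++ top ++ "/: " ++ PySem.Str.join ", " (files.take 15) ++ more)
  PySem.Str.join "\n" lines

-- ===== PRECONDITION & SPEC =====
def Spec_gather_file_tree_summary_py (tree : List (List (String × String))) (projects : Option (List String)) (out : String) : Prop := out = gather_file_tree_summary_py_alt tree projects
instance (tree : List (List (String × String))) (projects : Option (List String)) (out : String) : Decidable (Spec_gather_file_tree_summary_py tree projects out) := by unfold Spec_gather_file_tree_summary_py; infer_instance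

-- ===== CLAIM (what is proved, stated in full; the proofs are below) =====
def Claim_equal_gather_file_tree_summary_py : Prop := ∀ (tree : List (List (String × String))) (projects : Option (List String)), Dom_gather_file_tree_summary_py tree projects → Spec_gather_file_tree_summary_py tree projects (gather_file_tree_summary_py tree projects)

-- ===== LEMMAS AND PROOFS =====

-- abbreviations used only by the proofs
def pvStrip (e : List (String × String)) : String := PySem.Str.strip (((PySem.Dict.ofList e).get? "path").getD "")
def pvValid (p : String) : Bool := !(p == "" || PySem.Str.startswith p ".")
def pvTop (p : String) : String := ((PySem.Str.split? p "/").getD []).headI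
def pvIsRoot (p : String) : Bool := ((PySem.Str.split? p "/").getD []).length == 1
def pvPaths (tree : List (List (String × String))) : List String := (tree.map pvStrip).filter pvValid
def pvRootsA (tree : List (List (String × String))) : List String := (pvPaths tree).filter pvIsRoot
def pvPairsA (tree : List (List (String × String))) : List (String × String) := ((pvPaths tree).filter (fun p => !pvIsRoot p)).map (fun p => (pvTop p, p))

theorem pv_go_no_sep (fuel : Nat) (l cur : List Char) (acc : List (List Char))
    (h : l.length ≤ fuel) (hno : '/' ∉ l) :
    PySem.Chars.splitOn.go ['/'] fuel l cur acc = acc.reverse ++ [cur.reverse ++ l] := by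
  induction fuel generalizing l cur acc with
  | zero => simp [PySem.Chars.splitOn.go]
  | succ f ih =>
    cases l with
    | nil => simp [PySem.Chars.splitOn.go]
    | cons c rest =>
      rw [PySem.Chars.splitOn.go]
      have hc : c ≠ '/' := fun hh => hno (by simp [hh])
      have hpre : List.isPrefixOf ['/'] (c :: rest) = false := by
        simp [List.isPrefixOf]; exact fun hh => absurd hh.symm hc
      rw [if_neg (by simp [hpre])]
      rw [ih rest (c :: cur) acc (by simpa using Nat.le_of_succ_le_succ h) (fun hh => hno (by simp [hh]))]
      simp

theorem pv_go_len_ge (sep : List Char) (fuel : Nat) (l cur : List Char) (acc : List (List Char)) :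
    acc.length + 1 ≤ (PySem.Chars.splitOn.go sep fuel l cur acc).length := by
  induction fuel generalizing l cur acc with
  | zero => simp [PySem.Chars.splitOn.go]
  | succ f ih =>
    cases l with
    | nil => simp [PySem.Chars.splitOn.go]
    | cons c rest =>
      rw [PySem.Chars.splitOn.go]
      split
      · have := ih (List.drop sep.length (c :: rest)) [] (cur.reverse :: acc)
        simp at this; omega
      · exact ih rest (c :: cur) acc

theorem pv_go_with_sep (fuel : Nat) (l cur : List Char) (acc : List (List Char))
    (h : l.length ≤ fuel) (hy : '/' ∈ l) :
    acc.length + 2 ≤ (PySem.Chars.splitOn.go ['/'] fuel l cur acc).length := by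
  induction fuel generalizing l cur acc with
  | zero => simp at h; simp [h] at hy
  | succ f ih =>
    cases l with
    | nil => simp at hy
    | cons c rest =>
      rw [PySem.Chars.splitOn.go]
      by_cases hc : c = '/'
      · rw [if_pos (by simp [List.isPrefixOf, hc])]
        have := pv_go_len_ge ['/'] f (List.drop 1 (c :: rest)) [] (cur.reverse :: acc)
        simp at this ⊢; omega
      · rw [if_neg (by simp [List.isPrefixOf]; exact fun hh => absurd hh.symm hc)]
        have hr : '/' ∈ rest := by cases hy with
          | head => exact absurd rfl hc
          | tail _ hh => exact hh
        exact ih rest (c :: cur) acc (by simpa using Nat.le_of_succ_le_succ h) hr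

theorem pv_mem_iff_infix (s : List Char) : '/' ∈ s ↔ ['/'] <:+: s := by
  constructor
  · intro h
    obtain ⟨s1, s2, rfl⟩ := List.append_of_mem h
    exact ⟨s1, s2, by simp⟩
  · intro h; exact h.subset (by simp)

theorem pv_isRoot_eq (p : String) : pvIsRoot p = !PySem.Str.isIn "/" p := by
  have hmap := PySem.Str.split?_map p "/"
  have hsep : ("/" : String).toList = ['/'] := rfl
  rw [hsep] at hmap
  have hsplit : PySem.Chars.split? p.toList ['/'] = some (PySem.Chars.splitOn p.toList ['/']) := by
    simp [PySem.Chars.split?]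
  rw [hsplit] at hmap
  obtain ⟨parts, hp⟩ : ∃ parts, PySem.Str.split? p "/" = some parts := by
    cases hq : PySem.Str.split? p "/" with
    | none => rw [hq] at hmap; simp at hmap
    | some parts => exact ⟨parts, rfl⟩
  rw [hp] at hmap
  simp at hmap
  have hlen : parts.length = (PySem.Chars.splitOn p.toList ['/']).length := by
    rw [← hmap]; simp
  rw [pvIsRoot, hp, PySem.Str.isIn_eq, hsep]
  by_cases hin : '/' ∈ p.toList
  · have h2 := pv_go_with_sep (p.toList.length + 1) p.toList [] [] (by omega) hin
    have : PySem.Chars.isIn ['/'] p.toList = true := (PySem.Chars.isIn_iff_infix _ _).2 ((pv_mem_iff_infix _).1 hin)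
    rw [this]
    simp only [PySem.Chars.splitOn] at hlen
    simp; omega
  · have h1 := pv_go_no_sep (p.toList.length + 1) p.toList [] [] (by omega) hin
    have : PySem.Chars.isIn ['/'] p.toList = false := by
      rw [PySem.Chars.isIn_eq_false_iff]; exact fun hh => hin ((pv_mem_iff_infix _).2 hh)
    rw [this]
    simp only [PySem.Chars.splitOn] at hlen
    rw [h1] at hlen; simp [hlen]

theorem pv_step_dict (d : PySem.Dict String (List String)) (t path : String) :
    ((if d.contains t then d else d.insert t ([] : List String)).modify t [] (fun l => l ++ [path]))
      = d.modify t [] (fun l => l ++ [path]) := by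
  by_cases hc : d.contains t
  · rw [if_pos hc]
  · rw [if_neg hc]
    simp only [PySem.Dict.modify]
    rw [PySem.Dict.getD_insert_self, PySem.Dict.insert_insert_self,
        PySem.Dict.getD_of_not_contains d [] (by simpa using hc)]

theorem pv_foldA (tree : List (List (String × String))) :
    ∀ (d : PySem.Dict String (List String)) (r : List String),
    tree.foldl pvAStep (d, r)
      = ((pvPairsA tree).foldl (fun d p => d.modify p.1 [] fun x => x ++ [p.2]) d, r ++ pvRootsA tree) := by
  induction tree with
  | nil => intro d r; simp [pvPairsA, pvRootsA, pvPaths]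
  | cons e t ih =>
    intro d r
    rw [List.foldl_cons]
    have hpaths : pvPaths (e :: t) = if pvValid (pvStrip e) then pvStrip e :: pvPaths t else pvPaths t := by
      simp only [pvPaths, List.map_cons, List.filter_cons]
    by_cases hv : pvValid (pvStrip e)
    · have hstep0 : ¬ ((pvStrip e == "" || PySem.Str.startswith (pvStrip e) ".") = true) := by
        simp only [pvValid] at hv; simpa using hv
      by_cases hr : pvIsRoot (pvStrip e)
      · have hstep : pvAStep (d, r) e = (d, r ++ [pvStrip e]) := by
          simp only [pvAStep, pvStrip] at *
          rw [if_neg hstep0, if_pos (by simpa [pvIsRoot, pvStrip] using hr)]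
        rw [hstep, ih]
        have : pvRootsA (e :: t) = pvStrip e :: pvRootsA t := by
          simp only [pvRootsA, hpaths, if_pos hv, List.filter_cons, if_pos hr]
        have hpairs : pvPairsA (e :: t) = pvPairsA t := by
          simp only [pvPairsA, hpaths, if_pos hv, List.filter_cons]
          simp [hr]
        rw [this, hpairs, List.append_assoc]
        rfl
      · have hstep : pvAStep (d, r) e
            = (d.modify (pvTop (pvStrip e)) [] (fun l => l ++ [pvStrip e]), r) := by
          simp only [pvAStep, pvStrip] at *
          rw [if_neg hstep0, if_neg (by simpa [pvIsRoot, pvStrip] using hr)]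
          rw [pv_step_dict]
          rfl
        rw [hstep, ih]
        have hpairs : pvPairsA (e :: t) = (pvTop (pvStrip e), pvStrip e) :: pvPairsA t := by
          simp only [pvPairsA, hpaths, if_pos hv, List.filter_cons]
          simp [hr]
        have hroots : pvRootsA (e :: t) = pvRootsA t := by
          simp only [pvRootsA, hpaths, if_pos hv, List.filter_cons]
          simp [hr]
        rw [hpairs, hroots, List.foldl_cons]
    · have hcond : (pvStrip e == "" || PySem.Str.startswith (pvStrip e) ".") = true := by
        simp only [pvValid, Bool.not_eq_true, Bool.not_eq_false'] at hv; exact hv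
      have hstep : pvAStep (d, r) e = (d, r) := by
        simp only [pvAStep, pvStrip] at *
        rw [if_pos hcond]
      have hpairs : pvPairsA (e :: t) = pvPairsA t := by simp [pvPairsA, hpaths, hv]
      have hroots : pvRootsA (e :: t) = pvRootsA t := by simp [pvRootsA, hpaths, hv]
      rw [hstep, ih, hpairs, hroots]

theorem pv_foldl_append {α : Type} (g : α → String) (l : List α) (lines : List String) :
    l.foldl (fun acc x => acc ++ [g x]) lines = lines ++ l.map g := by
  induction l generalizing lines with
  | nil => simp
  | cons x t ih => simp [List.foldl_cons, ih, List.append_assoc]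

-- pv-vocabulary characterizations of the two sides
theorem pv_roots_eq (tree : List (List (String × String))) :
    pvRootsA tree = (pvPaths tree).filter (fun p => !PySem.Str.isIn "/" p) := by
  unfold pvRootsA
  exact List.filter_congr (fun p _ => pv_isRoot_eq p)

theorem pv_dir_filter_eq (tree : List (List (String × String))) :
    (pvPaths tree).filter (fun p => !pvIsRoot p) = (pvPaths tree).filter (fun p => PySem.Str.isIn "/" p) := by
  exact List.filter_congr (fun p _ => by rw [pv_isRoot_eq p, Bool.not_not])

theorem pv_keys_eq (tree : List (List (String × String))) :
    (List.foldl (fun d p => d.modify p.1 [] fun x => x ++ [p.2]) (PySem.Dict.empty : PySem.Dict String (List String)) (pvPairsA tree)).keys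
      = (PySem.Set.ofList (((pvPaths tree).filter (fun p => PySem.Str.isIn "/" p)).map pvTop) : List String) := by
  have hk := PySem.Dict.keys_foldl_modify_key (pvPairsA tree) (fun p : String × String => p.1)
      ([] : List String) (fun _ p => fun x => x ++ [p.2]) (PySem.Dict.empty : PySem.Dict String (List String))
  simp only [] at hk
  rw [hk, PySem.Dict.keys_empty]
  have hmap : (pvPairsA tree).map (fun p : String × String => p.1)
      = ((pvPaths tree).filter (fun p => PySem.Str.isIn "/" p)).map pvTop := by
    rw [pvPairsA, pv_dir_filter_eq, List.map_map]
    rfl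
  rw [hmap]
  rfl

theorem pv_getD_eq (tree : List (List (String × String))) (top : String) :
    (List.foldl (fun d p => d.modify p.1 [] fun x => x ++ [p.2]) (PySem.Dict.empty : PySem.Dict String (List String)) (pvPairsA tree)).getD top []
      = (pvPaths tree).filter (fun p => PySem.Str.isIn "/" p && (pvTop p == top)) := by
  rw [PySem.Dict.getD_foldl_modify_append]
  rw [PySem.Dict.getD_of_not_contains _ _ (by rw [PySem.Dict.contains_empty])]
  rw [List.nil_append, pvPairsA, pv_dir_filter_eq, List.filter_map]
  have : ((fun q : String × String => q.1 == top) ∘ (fun p => (pvTop p, p))) = fun p => pvTop p == top := rfl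
  rw [this, List.map_map]
  have : ((fun q : String × String => q.2) ∘ (fun p => (pvTop p, p))) = id := rfl
  rw [this, List.map_id, List.filter_filter]
  exact List.filter_congr (fun p _ => by rw [Bool.and_comm])

theorem pv_join_ite (l : List String) :
    (if l ≠ [] then PySem.Str.join "\n" l else "") = PySem.Str.join "\n" l := by
  by_cases h : l = []
  · subst h; rfl
  · rw [if_pos h]

-- ===== VERDICT (by name: the statement is the Claim_ definition above) =====
theorem gather_file_tree_summary_py_spec : Claim_equal_gather_file_tree_summary_py := by
  intro tree projects _
  unfold Spec_gather_file_tree_summary_py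
  have hs : ∀ e : List (String × String), PySem.Str.strip (((PySem.Dict.ofList e).get? "path").getD "") = pvStrip e := fun _ => rfl
  have hv : ∀ p : String, (fun p => !(p == "" || PySem.Str.startswith p ".")) p = pvValid p := fun _ => rfl
  have ht : ∀ p : String, ((PySem.Str.split? p "/").getD []).headI = pvTop p := fun _ => rfl
  have hp : (List.map (fun entry => pvStrip entry) tree).filter (fun p => pvValid p) = pvPaths tree := rfl
  rcases projects with _ | (_ | ⟨q, qs⟩) <;>
  · simp only [gather_file_tree_summary_py, gather_file_tree_summary_py_alt]
    rw [pv_foldA]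
    simp only [hs, hv, ht]
    simp only [List.nil_append, pv_roots_eq, pv_keys_eq, pv_getD_eq, pv_foldl_append,
      PySem.List.length_sorted, pv_join_ite, ne_eq, PySem.List.sorted_eq_nil_iff,
      List.cons_ne_nil, if_false, if_true, hp]
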